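-- pv_equiv track=rewrite | github.com/nkngn/mv-visualizer | src/mv_lineage/cli.py | _node_prefetch_order
-- ===== SOURCE A (Python) =====
-- from typing import Iterable
--
-- def _node_prefetch_order(records: Iterable[dict[str, str]]) -> list[str]:
--     mv_nodes: list[str] = []
--     table_nodes: list[str] = []
--     seen: set[str] = set()
--     for record in records:
--         mv = record["mv"]
--         source = record["source"]
--         target = record["target"]
--         if mv not in seen:
--             mv_nodes.append(mv)
--             seen.add(mv)
--         if source not in seen:
--             table_nodes.append(source)
--             seen.add(source)
--         if target not in seen:
--             table_nodes.append(target)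
--             seen.add(target)
--     return mv_nodes + table_nodes
-- ===== SOURCE B (Python) =====
-- def _node_prefetch_order(records):
--     seq = [pair for record in records
--            for pair in ((record["mv"], True), (record["source"], False), (record["target"], False))]
--     first = {v: (i, f) for i, (v, f) in reversed(list(enumerate(seq)))}
--     order = sorted(first.items(), key=lambda kv: kv[1][0])
--     return [v for v, (i, f) in order if f] + [v for v, (i, f) in order if not f]
-- ===== Notes on version B (the rewrite author's own statement) =====
-- stated objective: alternative
-- what changed: Replaces A's single pass with a seen-set and two conditional-append lists by staged passes with no membership bookkeeping: flatten all (node, is-mv-slot) pairs, collapse to each node's first occurrence by building a dict from the reversed enumerated sequence (last write wins), sort the survivors by first-occurrence index, and emit flagged then unflagged; Pre_ excludes records missing one of the keys 'mv'/'source'/'target', on which A raises KeyError.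
import Mathlib
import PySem

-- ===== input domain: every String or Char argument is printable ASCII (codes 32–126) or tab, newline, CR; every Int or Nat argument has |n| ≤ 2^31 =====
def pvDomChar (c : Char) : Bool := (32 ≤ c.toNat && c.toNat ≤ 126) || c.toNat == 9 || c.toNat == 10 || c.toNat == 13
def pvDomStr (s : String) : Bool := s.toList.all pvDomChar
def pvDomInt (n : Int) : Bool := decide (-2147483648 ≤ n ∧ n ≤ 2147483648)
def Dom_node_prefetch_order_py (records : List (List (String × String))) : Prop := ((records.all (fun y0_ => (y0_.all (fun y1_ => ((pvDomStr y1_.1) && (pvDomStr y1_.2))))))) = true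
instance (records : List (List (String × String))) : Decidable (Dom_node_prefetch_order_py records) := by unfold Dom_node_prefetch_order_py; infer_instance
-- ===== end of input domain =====

-- B replaces A's one-pass seen-set/two-list accumulation by staged passes with no membership
-- bookkeeping: flatten the (node, is-mv-slot) pairs, collapse to first occurrences by building a
-- dict from the reversed enumerated sequence (last write wins), sort by first index, then emit
-- flagged before unflagged (alternative decomposition, similar cost).

-- ===== PORT A =====
-- one iteration of A's loop body over the state (mv_nodes, table_nodes, seen)
def npoAStep (st : List String × List String × PySem.Set String) (record : List (String × String)) :
    List String × List String × PySem.Set String :=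
  let mv := (PySem.Dict.mk record).getD "mv" ""        -- Pre_ guarantees the key is present (KeyError excluded)
  let source := (PySem.Dict.mk record).getD "source" ""
  let target := (PySem.Dict.mk record).getD "target" ""
  let st1 := if PySem.Set.contains st.2.2 mv then st
             else (st.1 ++ [mv], st.2.1, PySem.Set.add st.2.2 mv)
  let st2 := if PySem.Set.contains st1.2.2 source then st1
             else (st1.1, st1.2.1 ++ [source], PySem.Set.add st1.2.2 source)
  if PySem.Set.contains st2.2.2 target then st2
  else (st2.1, st2.2.1 ++ [target], PySem.Set.add st2.2.2 target)

def node_prefetch_order_py (records : List (List (String × String))) : List String :=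
  let st := records.foldl npoAStep (([], [], PySem.Set.empty) : List String × List String × PySem.Set String)
  st.1 ++ st.2.1

-- ===== PORT B =====
-- the three (value, is_mv) pairs one record contributes to the flattened sequence
def npoTriple (record : List (String × String)) : List (String × Bool) :=
  [((PySem.Dict.mk record).getD "mv" "", true),        -- Pre_ guarantees the keys are present
   ((PySem.Dict.mk record).getD "source" "", false),
   ((PySem.Dict.mk record).getD "target" "", false)]

def node_prefetch_order_py_alt (records : List (List (String × String))) : List String :=
  let seq := records.flatMap npoTriple
  let first := (PySem.List.enumerate seq 0).reverse.foldl
      (fun d p => d.insert p.2.1 (p.1, p.2.2))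
      (PySem.Dict.empty : PySem.Dict String (Int × Bool))
  let order := PySem.List.sorted first.items (fun kv => kv.2.1) false
  (order.filter (fun kv => kv.2.2)).map (fun kv => kv.1) ++
  (order.filter (fun kv => !kv.2.2)).map (fun kv => kv.1)

-- ===== PRECONDITION & SPEC =====
-- Pre_ excludes records missing one of the keys "mv"/"source"/"target", on which Python A raises KeyError.
def Pre_node_prefetch_order_py (records : List (List (String × String))) : Prop :=
  (records.all (fun r => (PySem.Dict.mk r).contains "mv" &&
      (PySem.Dict.mk r).contains "source" && (PySem.Dict.mk r).contains "target")) = true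
instance (records : List (List (String × String))) : Decidable (Pre_node_prefetch_order_py records) := by
  unfold Pre_node_prefetch_order_py; infer_instance

def pvWitness_node_prefetch_order_py : (List (List (String × String))) :=
  [[("mv", "a"), ("source", "b"), ("target", "c")], [("mv", "b"), ("source", "c"), ("target", "d")]]

def Spec_node_prefetch_order_py (records : List (List (String × String))) (out : List String) : Prop := out = node_prefetch_order_py_alt records
instance (records : List (List (String × String))) (out : List String) : Decidable (Spec_node_prefetch_order_py records out) := by unfold Spec_node_prefetch_order_py; infer_instance

-- ===== CLAIM (what is proved, stated in full; the proofs are below) =====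
def Claim_equal_node_prefetch_order_py : Prop := ∀ (records : List (List (String × String))), Dom_node_prefetch_order_py records → Pre_node_prefetch_order_py records → Spec_node_prefetch_order_py records (node_prefetch_order_py records)

-- ===== LEMMAS AND PROOFS =====

-- A's loop body on one (value, flag) pair of the flattened sequence
def npoMicro (st : List String × List String × PySem.Set String) (p : String × Bool) :
    List String × List String × PySem.Set String :=
  if PySem.Set.contains st.2.2 p.1 then st
  else if p.2 then (st.1 ++ [p.1], st.2.1, PySem.Set.add st.2.2 p.1)
  else (st.1, st.2.1 ++ [p.1], PySem.Set.add st.2.2 p.1)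

-- first occurrences (value, index, flag) of an enumerated sequence, skipping values in `seen`
def focc : List (Int × (String × Bool)) → PySem.Set String → List (String × Int × Bool)
  | [], _ => []
  | (i, (v, f)) :: t, seen =>
      if PySem.Set.contains seen v then focc t seen
      else (v, (i, f)) :: focc t (PySem.Set.add seen v)

-- first-match association lookup in the enumerated sequence
def lookF : List (Int × (String × Bool)) → String → Option (Int × Bool)
  | [], _ => none
  | (i, (v, f)) :: t, k => if v == k then some (i, f) else lookF t k


theorem set_add_of_contains (s : PySem.Set String) (v : String)
    (h : PySem.Set.contains s v = true) : PySem.Set.add s v = s := by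
  have hm : v ∈ s := (PySem.Set.contains_iff s v).1 h
  simp [PySem.Set.add, hm]

theorem set_contains_add_self (s : PySem.Set String) (v : String) :
    PySem.Set.contains (PySem.Set.add s v) v = true :=
  (PySem.Set.contains_iff _ _).2 ((PySem.Set.mem_add _ _ _).2 (Or.inr rfl))

theorem set_contains_add_of_ne (s : PySem.Set String) (v k : String) (hne : v ≠ k) :
    PySem.Set.contains (PySem.Set.add s v) k = PySem.Set.contains s k := by
  by_cases hk : PySem.Set.contains s k = true
  · rw [hk, (PySem.Set.contains_iff _ _).2 ((PySem.Set.mem_add _ _ _).2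
      (Or.inl ((PySem.Set.contains_iff _ _).1 hk)))]
  · have hk' : PySem.Set.contains s k = false := by simp_all
    rw [hk']
    have hnm : ¬ k ∈ PySem.Set.add s v := by
      rw [PySem.Set.mem_add]
      rintro (h | h)
      · exact hk ((PySem.Set.contains_iff _ _).2 h)
      · exact hne h.symm
    simpa [PySem.Set.contains_iff] using hnm

theorem stepA_eq (st : List String × List String × PySem.Set String)
    (record : List (String × String)) :
    npoAStep st record = (npoTriple record).foldl npoMicro st := by
  rfl

theorem foldA_flat (records : List (List (String × String)))
    (st : List String × List String × PySem.Set String) :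
    records.foldl npoAStep st = (records.flatMap npoTriple).foldl npoMicro st := by
  induction records generalizing st with
  | nil => rfl
  | cons r rs ih =>
    simp [List.flatMap_cons, List.foldl_append, List.foldl_cons, ← stepA_eq, ih]

theorem micro_fold (s : List (String × Bool)) (i : Int) (m t : List String)
    (seen : PySem.Set String) :
    s.foldl npoMicro (m, t, seen) =
      (m ++ ((focc (PySem.List.enumerate s i) seen).filter (fun p => p.2.2)).map (fun p => p.1),
       t ++ ((focc (PySem.List.enumerate s i) seen).filter (fun p => !p.2.2)).map (fun p => p.1),
       PySem.Set.update seen (s.map (fun p => p.1))) := by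
  induction s generalizing i m t seen with
  | nil => simp [PySem.List.enumerate_nil, focc, PySem.Set.update]
  | cons x xs ih =>
    obtain ⟨v, f⟩ := x
    rw [PySem.List.enumerate_cons]
    by_cases hc : PySem.Set.contains seen v = true
    · have hadd : PySem.Set.add seen v = seen := set_add_of_contains seen v hc
      simp only [List.foldl_cons, npoMicro, hc, if_true, focc, List.map_cons,
        PySem.Set.update, List.foldl_cons, hadd]
      exact ih (i + 1) m t seen
    · have hc' : PySem.Set.contains seen v = false := by simp_all
      cases f with
      | true =>
        simp only [List.foldl_cons, npoMicro, hc', if_true, if_false, Bool.false_eq_true,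
          focc, List.map_cons, PySem.Set.update, List.foldl_cons, List.filter_cons]
        rw [ih (i + 1) (m ++ [v]) t (PySem.Set.add seen v)]
        simp [PySem.Set.update]
      | false =>
        simp only [List.foldl_cons, npoMicro, hc', if_false, Bool.false_eq_true,
          focc, List.map_cons, PySem.Set.update, List.foldl_cons, List.filter_cons]
        rw [ih (i + 1) m (t ++ [v]) (PySem.Set.add seen v)]
        simp [PySem.Set.update]

theorem revfold_get? (L : List (Int × (String × Bool))) (k : String) :
    ((L.reverse.foldl (fun d p => d.insert p.2.1 (p.1, p.2.2))
        (PySem.Dict.empty : PySem.Dict String (Int × Bool))).get? k) = lookF L k := by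
  rw [List.foldl_reverse]
  induction L with
  | nil => simp [lookF, PySem.Dict.get?_empty]
  | cons x t ih =>
    obtain ⟨i, v, f⟩ := x
    simp only [List.foldr_cons, lookF]
    rw [PySem.Dict.get?_insert]
    by_cases h : v = k
    · subst h; simp
    · have hb : (v == k) = false := by simp [h]
      have hk : ¬ k = v := fun hh => h hh.symm
      simp [hb, hk, ih]

theorem mem_focc_iff (L : List (Int × (String × Bool))) (seen : PySem.Set String)
    (k : String) (p : Int × Bool) :
    (k, p) ∈ focc L seen ↔ (lookF L k = some p ∧ PySem.Set.contains seen k = false) := by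
  induction L generalizing seen with
  | nil => simp [focc, lookF]
  | cons x t ih =>
    obtain ⟨i, v, f⟩ := x
    by_cases hvk : v = k
    · subst hvk
      by_cases hc : PySem.Set.contains seen v = true
      · simp only [focc, hc, if_true, lookF, beq_self_eq_true, ih]
        constructor <;> rintro ⟨_, h2⟩ <;> exact absurd h2 (by simp)
      · have hc' : PySem.Set.contains seen v = false := by simp_all
        have hca := set_contains_add_self seen v
        simp only [focc, hc', Bool.false_eq_true, if_false, lookF, beq_self_eq_true, if_true,
          List.mem_cons]
        constructor
        · rintro (h | h)
          · have hp : p = (i, f) := by simpa using h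
            exact ⟨by rw [hp], by simp⟩
          · have := ((ih _).1 h).2
            rw [hca] at this
            simp at this
        · rintro ⟨h, _⟩
          have hp : (i, f) = p := Option.some.inj h
          exact Or.inl (by rw [← hp])
    · have hbeq : (v == k) = false := by simp [hvk]
      by_cases hc : PySem.Set.contains seen v = true
      · simp only [focc, hc, if_true, lookF, hbeq, Bool.false_eq_true, if_false, ih]
      · have hc' : PySem.Set.contains seen v = false := by simp_all
        have hck := set_contains_add_of_ne seen v k hvk
        simp only [focc, hc', Bool.false_eq_true, if_false, lookF, hbeq, List.mem_cons, ih, hck]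
        constructor
        · rintro (h | h)
          · exact absurd (congrArg Prod.fst h) (by simp; exact fun hh => hvk hh.symm)
          · exact h
        · exact Or.inr

theorem focc_not_mem_seen (L : List (Int × (String × Bool))) (seen : PySem.Set String) :
    ∀ q ∈ focc L seen, PySem.Set.contains seen q.1 = false := by
  intro q hq
  obtain ⟨k, p⟩ := q
  exact ((mem_focc_iff L seen k p).1 hq).2

theorem nodup_keys_focc (L : List (Int × (String × Bool))) (seen : PySem.Set String) :
    ((focc L seen).map (fun q => q.1)).Nodup := by
  induction L generalizing seen with
  | nil => simp [focc]
  | cons x t ih =>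
    obtain ⟨i, v, f⟩ := x
    by_cases hc : PySem.Set.contains seen v = true
    · have hm : v ∈ seen := (PySem.Set.contains_iff seen v).1 hc
      simpa [focc, hc, hm] using ih seen
    · have hc' : PySem.Set.contains seen v = false := by simp_all
      have hca := set_contains_add_self seen v
      simp only [focc, hc', Bool.false_eq_true, if_false, List.map_cons, List.nodup_cons]
      refine ⟨?_, ih (PySem.Set.add seen v)⟩
      intro hmem
      obtain ⟨q, hq, hq1⟩ := List.mem_map.1 hmem
      have hns := focc_not_mem_seen t (PySem.Set.add seen v) q hq
      rw [hq1, hca] at hns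
      simp at hns

theorem focc_sublist (L : List (Int × (String × Bool))) (seen : PySem.Set String) :
    (focc L seen).Sublist (L.map (fun q => (q.2.1, (q.1, q.2.2)))) := by
  induction L generalizing seen with
  | nil => simp [focc]
  | cons x t ih =>
    obtain ⟨i, v, f⟩ := x
    by_cases hc : PySem.Set.contains seen v = true
    · have hm : v ∈ seen := (PySem.Set.contains_iff seen v).1 hc
      simpa [focc, hc, hm] using (ih seen).cons _
    · have hc' : PySem.Set.contains seen v = false := by simp_all
      simp only [focc, hc', Bool.false_eq_true, if_false, List.map_cons]
      exact (ih (PySem.Set.add seen v)).cons₂ _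

theorem focc_pairwise (s : List (String × Bool)) :
    (focc (PySem.List.enumerate s 0) PySem.Set.empty).Pairwise
      (fun a b => a.2.1 < b.2.1) := by
  have hen : (PySem.List.enumerate s 0).Pairwise (fun p q => p.1 < q.1) :=
    PySem.List.pairwise_lt_enumerate s 0
  have hmap : ((PySem.List.enumerate s 0).map (fun q => (q.2.1, (q.1, q.2.2)))).Pairwise
      (fun a b => a.2.1 < b.2.1) := by
    rw [List.pairwise_map]
    exact hen
  exact List.Pairwise.sublist (focc_sublist _ _) hmap

-- the dict built from the reversed enumerated sequence enumerates exactly the first occurrences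
theorem first_items_perm (s : List (String × Bool)) :
    (((PySem.List.enumerate s 0).reverse.foldl (fun d p => d.insert p.2.1 (p.1, p.2.2))
        (PySem.Dict.empty : PySem.Dict String (Int × Bool))).items).Perm
      (focc (PySem.List.enumerate s 0) PySem.Set.empty) := by
  set L := PySem.List.enumerate s 0 with hL
  set D := L.reverse.foldl (fun d p => d.insert p.2.1 (p.1, p.2.2))
      (PySem.Dict.empty : PySem.Dict String (Int × Bool)) with hD
  have hkeys : D.keys.Nodup := by
    rw [hD]
    exact PySem.Dict.nodup_keys_foldl_insert_key L.reverse (fun p => p.2.1)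
      (fun d p => (p.1, p.2.2)) _ PySem.Dict.nodup_keys_empty
  have hnd1 : D.items.Nodup := (List.Nodup.of_map _ hkeys)
  have hnd2 : (focc L PySem.Set.empty).Nodup :=
    (List.Nodup.of_map _ (nodup_keys_focc L PySem.Set.empty))
  rw [List.perm_ext_iff_of_nodup hnd1 hnd2]
  intro a
  obtain ⟨k, p⟩ := a
  rw [mem_focc_iff, ← PySem.Dict.get?_eq_some_iff_mem_items D k p hkeys, hD, revfold_get?]
  have hce : PySem.Set.contains (PySem.Set.empty : PySem.Set String) k = false := rfl
  simp

theorem sorted_first_eq (s : List (String × Bool)) :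
    PySem.List.sorted
      (((PySem.List.enumerate s 0).reverse.foldl (fun d p => d.insert p.2.1 (p.1, p.2.2))
        (PySem.Dict.empty : PySem.Dict String (Int × Bool))).items)
      (fun kv => kv.2.1) false
    = focc (PySem.List.enumerate s 0) PySem.Set.empty := by
  exact PySem.List.sorted_eq_of_perm_of_pairwise_lt _ _ _
    ((first_items_perm s).symm) (focc_pairwise s)

-- ===== VERDICT (by name: the statement is the Claim_ definition above) =====
theorem node_prefetch_order_py_spec : Claim_equal_node_prefetch_order_py := by
  intro records _ _
  unfold Spec_node_prefetch_order_py node_prefetch_order_py node_prefetch_order_py_alt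
  simp only []
  rw [foldA_flat, micro_fold (records.flatMap npoTriple) 0 [] [] PySem.Set.empty,
    sorted_first_eq]
  simp
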